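-- pv_equiv track=rewrite | github.com/lord-carlos/youtube-test | main.py | filter_by_channels
-- ===== SOURCE A (Python) =====
-- def filter_by_channels(likes, channels):
--     chan_set = {c.casefold(): c for c in channels}
--     filtered = []
--     for item in likes:
--         uploader = item["uploader"]
--         if uploader and uploader.casefold() in chan_set:
--             filtered.append(item)
--     return filtered
-- ===== SOURCE B (Python) =====
-- def filter_by_channels(likes, channels):
--     keys = sorted(c.casefold() for c in channels)
--
--     def found(u):
--         lo, hi = 0, len(keys)
--         while lo < hi:
--             mid = (lo + hi) // 2
--             if keys[mid] < u:
--                 lo = mid + 1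
--             elif u < keys[mid]:
--                 hi = mid
--             else:
--                 return True
--         return False
--
--     return [item for item in likes
--             if item["uploader"] and found(item["uploader"].casefold())]
-- ===== Notes on version B (the rewrite author's own statement) =====
-- stated objective: alternative
-- what changed: Replaces A's precomputed casefolded-key hash dict with a sort of the casefolded channel names followed by a hand-written binary search per like, trading the hash index for sorted order.
import Mathlib
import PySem

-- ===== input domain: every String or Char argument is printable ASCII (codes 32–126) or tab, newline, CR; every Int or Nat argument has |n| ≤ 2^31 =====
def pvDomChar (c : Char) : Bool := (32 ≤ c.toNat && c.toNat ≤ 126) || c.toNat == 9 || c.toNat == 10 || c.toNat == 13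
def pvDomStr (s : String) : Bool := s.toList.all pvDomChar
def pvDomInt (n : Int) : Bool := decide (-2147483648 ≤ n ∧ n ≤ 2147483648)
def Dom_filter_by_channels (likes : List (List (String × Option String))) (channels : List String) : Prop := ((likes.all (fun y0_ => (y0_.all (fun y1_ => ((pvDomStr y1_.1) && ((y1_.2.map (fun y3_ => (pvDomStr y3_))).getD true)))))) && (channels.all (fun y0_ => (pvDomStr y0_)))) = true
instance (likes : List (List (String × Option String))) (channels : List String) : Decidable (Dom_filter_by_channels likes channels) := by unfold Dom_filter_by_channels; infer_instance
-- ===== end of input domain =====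

-- B replaces A's precomputed casefolded-key hash dict with a sort of the casefolded
-- channel names followed by a hand-written binary search per like (alternative
-- algorithm; casefold is exact as lower on the ASCII domain).

-- item["uploader"]: first-match lookup in the association list (none = KeyError)
def pvUploader (item : List (String × Option String)) : Option (Option String) :=
  (item.find? (fun p => p.1 == "uploader")).map (·.2)

-- ===== PORT A =====
def filter_by_channels (likes : List (List (String × Option String))) (channels : List String) : List (List (String × Option String)) :=
  let chan_set : PySem.Dict String String :=
    channels.foldl (fun d c => d.insert (PySem.Str.lower c) c) PySem.Dict.empty
  likes.foldl (fun filtered item =>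
    match pvUploader item with
    | some (some u) =>
        -- `if uploader and uploader.casefold() in chan_set`
        if u ≠ "" ∧ chan_set.contains (PySem.Str.lower u) then filtered ++ [item]
        else filtered
    | some none => filtered      -- uploader is None: falsy
    | none => filtered           -- KeyError: excluded by Pre_
    ) []

-- ===== PORT B =====
-- Source B's hand-written `found`: binary search over the sorted list `keys`.
-- At every call in B, mid < hi ≤ keys.length, so `keys.getD mid ""` is keys[mid].
def pvFound (keys : List String) (u : String) (lo hi : Nat) : Bool :=
  if _h : lo < hi then
    let mid := (lo + hi) / 2     -- lo,hi ≥ 0, so Python's // 2 is Nat division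
    let k := keys.getD mid ""
    if k < u then pvFound keys u (mid + 1) hi
    else if u < k then pvFound keys u lo mid
    else true
  else false
termination_by hi - lo
decreasing_by all_goals omega

def filter_by_channels_alt (likes : List (List (String × Option String))) (channels : List String) : List (List (String × Option String)) :=
  let keys := PySem.List.sorted (channels.map PySem.Str.lower) (fun x => x) false
  likes.filter (fun item =>
    match pvUploader item with
    | some (some u) => decide (u ≠ "") && pvFound keys (PySem.Str.lower u) 0 keys.length
    | some none => false         -- uploader is None: falsy
    | none => false)             -- KeyError: excluded by Pre_

-- ===== PRECONDITION & SPEC =====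
-- Pre_ excludes exactly the inputs where some like lacks the "uploader" key: both A and B raise KeyError there.
def Pre_filter_by_channels (likes : List (List (String × Option String))) (channels : List String) : Prop :=
  ∀ item ∈ likes, ∃ p ∈ item, p.1 = "uploader"
instance (likes : List (List (String × Option String))) (channels : List String) : Decidable (Pre_filter_by_channels likes channels) := by unfold Pre_filter_by_channels; infer_instance

def pvWitness_filter_by_channels : (List (List (String × Option String))) × List String :=
  ([[("uploader", some "Foo")], [("uploader", none)]], ["foo", "Bar"])

def Spec_filter_by_channels (likes : List (List (String × Option String))) (channels : List String) (out : List (List (String × Option String))) : Prop := out = filter_by_channels_alt likes channels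
instance (likes : List (List (String × Option String))) (channels : List String) (out : List (List (String × Option String))) : Decidable (Spec_filter_by_channels likes channels out) := by unfold Spec_filter_by_channels; infer_instance

-- ===== CLAIM =====
def Claim_equal_filter_by_channels : Prop := ∀ (likes : List (List (String × Option String))) (channels : List String), Dom_filter_by_channels likes channels → Pre_filter_by_channels likes channels → Spec_filter_by_channels likes channels (filter_by_channels likes channels)

-- ===== LEMMAS AND PROOFS =====

-- membership in A's dict of casefolded keys = a scan of the channels list
theorem contains_fold_insert_lower (channels : List String) (d : PySem.Dict String String) (k : String) :
    (channels.foldl (fun d c => d.insert (PySem.Str.lower c) c) d).contains k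
      = (d.contains k || channels.any (fun c => k == PySem.Str.lower c)) := by
  induction channels generalizing d with
  | nil => simp
  | cons c cs ih =>
    simp only [List.foldl_cons, List.any_cons, ih, PySem.Dict.contains_insert]
    cases h : d.contains k <;> simp [Bool.or_comm, Bool.or_assoc, Bool.or_left_comm]

-- B's binary search over a (getD-)monotone list decides membership on the index range [lo, hi)
theorem pvFound_iff (keys : List String) (u : String)
    (mono : ∀ p q : Nat, p ≤ q → q < keys.length → keys.getD p "" ≤ keys.getD q "") :
    ∀ n lo hi, hi - lo ≤ n → hi ≤ keys.length →
      (pvFound keys u lo hi = true ↔ ∃ i, lo ≤ i ∧ i < hi ∧ keys.getD i "" = u) := by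
  intro n
  induction n with
  | zero =>
    intro lo hi hn _
    rw [pvFound]
    simp only [show ¬ lo < hi by omega, dite_false]
    constructor
    · intro h; cases h
    · rintro ⟨i, h1, h2, _⟩; omega
  | succ n ih =>
    intro lo hi hn hhi
    rw [pvFound]
    by_cases hlh : lo < hi
    · simp only [hlh, dite_true]
      set mid := (lo + hi) / 2 with hmid
      have hmlo : lo ≤ mid := by omega
      have hmhi : mid < hi := by omega
      by_cases h1 : keys.getD mid "" < u
      · simp only [h1, if_true]
        rw [ih (mid + 1) hi (by omega) hhi]
        constructor
        · rintro ⟨i, a, b, c⟩; exact ⟨i, by omega, b, c⟩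
        · rintro ⟨i, a, b, c⟩
          refine ⟨i, ?_, b, c⟩
          by_contra hcon
          have : i ≤ mid := by omega
          have := mono i mid this (by omega)
          rw [c] at this
          exact absurd (lt_of_le_of_lt this h1) (lt_irrefl u)
      · by_cases h2 : u < keys.getD mid ""
        · simp only [h1, if_false, h2, if_true]
          rw [ih lo mid (by omega) (by omega)]
          constructor
          · rintro ⟨i, a, b, c⟩; exact ⟨i, a, by omega, c⟩
          · rintro ⟨i, a, b, c⟩
            refine ⟨i, a, ?_, c⟩
            by_contra hcon
            have : mid ≤ i := by omega
            have := mono mid i this (by omega)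
            rw [c] at this
            exact absurd (lt_of_lt_of_le h2 this) (lt_irrefl u)
        · simp only [h1, if_false, h2, if_true]
          have : keys.getD mid "" = u := le_antisymm (not_lt.mp h2) (not_lt.mp h1)
          exact ⟨fun _ => ⟨mid, hmlo, hmhi, this⟩, fun _ => trivial⟩
    · simp only [hlh, dite_false]
      constructor
      · intro h; cases h
      · rintro ⟨i, a, b, _⟩; omega

-- the full-range binary search over the sorted casefolded channels = A's scan
theorem pvFound_eq_any (channels : List String) (u : String) :
    (let keys := PySem.List.sorted (channels.map PySem.Str.lower) (fun x => x) false
     pvFound keys u 0 keys.length)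
      = channels.any (fun c => u == PySem.Str.lower c) := by
  set keys := PySem.List.sorted (channels.map PySem.Str.lower) (fun x => x) false with hk
  have mono : ∀ p q : Nat, p ≤ q → q < keys.length → keys.getD p "" ≤ keys.getD q "" := by
    intro p q hpq hq
    have hp : p < keys.length := lt_of_le_of_lt hpq hq
    rw [List.getD_eq_getElem _ _ hp, List.getD_eq_getElem _ _ hq]
    exact PySem.List.sorted_id_getElem_mono (channels.map PySem.Str.lower) hpq hq
  have hmem : (u ∈ keys) ↔ u ∈ channels.map PySem.Str.lower :=
    (PySem.List.sorted_perm (channels.map PySem.Str.lower) (fun x => x) false).mem_iff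
  have := pvFound_iff keys u mono (keys.length) 0 keys.length (by omega) (le_refl _)
  by_cases h : u ∈ channels.map PySem.Str.lower
  · have : pvFound keys u 0 keys.length = true := by
      rw [this]
      obtain ⟨i, hi, hgi⟩ := List.mem_iff_getElem.mp (hmem.mpr h)
      exact ⟨i, Nat.zero_le _, hi, by rw [List.getD_eq_getElem _ _ hi, hgi]⟩
    rw [this]
    symm
    simp only [List.any_eq_true]
    obtain ⟨c, hc, hcu⟩ := List.mem_map.mp h
    exact ⟨c, hc, by simp [hcu]⟩
  · have : pvFound keys u 0 keys.length = false := by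
      rw [Bool.eq_false_iff]
      intro hf
      obtain ⟨i, _, hi, hgi⟩ := this.mp hf
      exact h (hmem.mp (by rw [← hgi, List.getD_eq_getElem _ _ hi]; exact List.getElem_mem hi))
    rw [this]
    symm
    simp only [List.any_eq_false]
    intro c hc
    simp only [beq_iff_eq]
    intro he
    exact h (List.mem_map.mpr ⟨c, hc, he.symm⟩)

-- A's loop, accumulator generalized, equals B's filter
theorem foldl_body_eq_filter (channels : List String) (likes : List (List (String × Option String))) (acc : List (List (String × Option String))) :
    likes.foldl (fun filtered item =>
      match pvUploader item with
      | some (some u) =>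
          if u ≠ "" ∧ (channels.foldl (fun d c => d.insert (PySem.Str.lower c) c) PySem.Dict.empty).contains (PySem.Str.lower u) then filtered ++ [item]
          else filtered
      | some none => filtered
      | none => filtered) acc
    = acc ++ likes.filter (fun item =>
        match pvUploader item with
        | some (some u) =>
            decide (u ≠ "") && pvFound (PySem.List.sorted (channels.map PySem.Str.lower) (fun x => x) false) (PySem.Str.lower u) 0 (PySem.List.sorted (channels.map PySem.Str.lower) (fun x => x) false).length
        | some none => false
        | none => false) := by
  induction likes generalizing acc with
  | nil => simp
  | cons item rest ih =>
    simp only [List.foldl_cons, List.filter_cons]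
    cases h : pvUploader item with
    | none => simp [h, ih]
    | some uo =>
      cases uo with
      | none => simp [h, ih]
      | some u =>
        have hfound := pvFound_eq_any channels (PySem.Str.lower u)
        simp only at hfound
        by_cases hu : u = ""
        · simp [h, hu, ih]
        · have hch : (channels.foldl (fun d c => d.insert (PySem.Str.lower c) c) PySem.Dict.empty).contains (PySem.Str.lower u)
              = pvFound (PySem.List.sorted (channels.map PySem.Str.lower) (fun x => x) false) (PySem.Str.lower u) 0 (PySem.List.sorted (channels.map PySem.Str.lower) (fun x => x) false).length := by
            rw [hfound, contains_fold_insert_lower]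
            simp
          have hlen : (PySem.List.sorted (channels.map PySem.Str.lower) (fun x => x) false).length = channels.length := by
            rw [(PySem.List.sorted_perm (channels.map PySem.Str.lower) (fun x => x) false).length_eq, List.length_map]
          rw [hlen] at hch
          by_cases hc : pvFound (PySem.List.sorted (channels.map PySem.Str.lower) (fun x => x) false) (PySem.Str.lower u) 0 channels.length = true
          · simp [h, hu, hch, hc, ih]
          · simp [h, hu, hch, hc, ih]

-- ===== VERDICT =====
theorem filter_by_channels_spec : Claim_equal_filter_by_channels := by
  intro likes channels _ _
  unfold Spec_filter_by_channels filter_by_channels filter_by_channels_alt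
  simpa using foldl_body_eq_filter channels likes []
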